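-- pv_equiv track=rewrite | github.com/corgilee/Implementation | mianjin/roblox/remove_prefix_string_from_a_list.py | remove_prefix_strings
-- ===== SOURCE A (Python) =====
-- def remove_prefix_strings(strings):
--     result = []
--
--     # Iterate through the list in order
--     for i in range(len(strings)):
--         is_prefix = False
--
--         # Compare with all other strings
--         for j in range(len(strings)):
--             if i == j:
--                 continue  # Skip comparing with itself
--
--             # Check if current string is a prefix of another
--             if strings[j].startswith(strings[i]):
--                 is_prefix = True
--                 break  # No need to check further
--
--         # If it's not a prefix of any other string, add to result
--         if not is_prefix:
--             result.append(strings[i])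
--
--     return result
-- ===== SOURCE B (Python) =====
-- def remove_prefix_strings(strings):
--     # One pass builds a multiplicity table and the set of all proper prefixes;
--     # a final pass keeps s iff it is unique and no other string extends it.
--     count = {}
--     prefixes = set()
--     for s in strings:
--         count[s] = count.get(s, 0) + 1
--         for k in range(len(s)):
--             prefixes.add(s[:k])
--     return [s for s in strings if count[s] == 1 and s not in prefixes]
-- ===== Notes on version B (the rewrite author's own statement) =====
-- stated objective: faster
-- what changed: A's quadratic all-pairs startswith scan is replaced by a single pass that builds a multiplicity table and the set of all proper prefixes, followed by one filtering pass using O(1) average-time lookups.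
import Mathlib
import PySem

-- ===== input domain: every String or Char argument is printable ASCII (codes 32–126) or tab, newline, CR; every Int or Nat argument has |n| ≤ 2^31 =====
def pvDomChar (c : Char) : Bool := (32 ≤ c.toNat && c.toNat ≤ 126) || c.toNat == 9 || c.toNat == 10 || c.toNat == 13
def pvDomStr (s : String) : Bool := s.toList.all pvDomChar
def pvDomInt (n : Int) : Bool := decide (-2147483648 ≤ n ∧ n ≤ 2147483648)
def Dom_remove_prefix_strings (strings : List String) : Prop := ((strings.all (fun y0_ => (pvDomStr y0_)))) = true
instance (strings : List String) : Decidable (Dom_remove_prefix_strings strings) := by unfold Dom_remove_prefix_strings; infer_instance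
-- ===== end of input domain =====

-- B replaces A's all-pairs prefix scan by one pass that builds a multiplicity
-- table and the set of all proper prefixes, then filters in one more pass.

-- ===== PORT A =====
-- inner loop 'for j in range(len(strings)): …' with its break
def aInner (strings : List String) (i j : Nat) : Bool :=
  if _h : j < strings.length then
    if i = j then aInner strings i (j+1)
    else if PySem.Str.startswith (strings.getD j "") (strings.getD i "") then true
    else aInner strings i (j+1)
  else false
termination_by strings.length - j

-- outer loop 'for i in range(len(strings)): …', appending kept strings to result
def aOuter (strings : List String) (i : Nat) : List String :=
  if _h : i < strings.length then
    (if aInner strings i 0 then aOuter strings (i+1)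
     else strings.getD i "" :: aOuter strings (i+1))
  else []
termination_by strings.length - i

def remove_prefix_strings (strings : List String) : List String := aOuter strings 0

-- ===== PORT B =====
-- loop body: count[s] = count.get(s, 0) + 1; for k in range(len(s)): prefixes.add(s[:k])
def bStep (cp : PySem.Dict String Int × PySem.Set String) (s : String) :
    PySem.Dict String Int × PySem.Set String :=
  (cp.1.insert s (cp.1.getD s 0 + 1),
   (PySem.List.pyRange 0 (PySem.Str.len s) 1).foldl
     (fun P k => PySem.Set.add P (PySem.Str.slice s none (some k))) cp.2)

def remove_prefix_strings_alt (strings : List String) : List String :=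
  let cp := strings.foldl bStep (PySem.Dict.empty, PySem.Set.empty)
  strings.filter (fun s => (cp.1.getD s 0 == 1) && !(PySem.Set.contains cp.2 s))

-- ===== PRECONDITION & SPEC =====
def Spec_remove_prefix_strings (strings : List String) (out : List String) : Prop := out = remove_prefix_strings_alt strings
instance (strings : List String) (out : List String) : Decidable (Spec_remove_prefix_strings strings out) := by unfold Spec_remove_prefix_strings; infer_instance

-- ===== CLAIM (what is proved, stated in full; the proofs are below) =====
def Claim_equal_remove_prefix_strings : Prop := ∀ (strings : List String), Dom_remove_prefix_strings strings → Spec_remove_prefix_strings strings (remove_prefix_strings strings)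

-- ===== LEMMAS AND PROOFS =====

theorem aInner_iff (strings : List String) (i j : Nat) :
    aInner strings i j = true ↔
      ∃ k, j ≤ k ∧ k < strings.length ∧ k ≠ i ∧
        (strings.getD i "").toList <+: (strings.getD k "").toList := by
  fun_induction aInner strings i j
  case case1 h ih =>
    rw [ih]
    constructor
    · rintro ⟨k, hk1, hk2, hk3, hk4⟩; exact ⟨k, by omega, hk2, hk3, hk4⟩
    · rintro ⟨k, hk1, hk2, hk3, hk4⟩; exact ⟨k, by omega, hk2, hk3, hk4⟩
  case case2 j h hne hsw =>
    simp only [PySem.Str.startswith_eq, PySem.Chars.startswith_iff] at hsw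
    simp only [true_iff]
    exact ⟨j, le_refl j, h, fun e => hne e.symm, hsw⟩
  case case3 j h hne hsw ih =>
    simp only [PySem.Str.startswith_eq, PySem.Chars.startswith_iff] at hsw
    rw [ih]
    constructor
    · rintro ⟨k, hk1, hk2, hk3, hk4⟩; exact ⟨k, by omega, hk2, hk3, hk4⟩
    · rintro ⟨k, hk1, hk2, hk3, hk4⟩
      refine ⟨k, ?_, hk2, hk3, hk4⟩
      rcases Nat.eq_or_lt_of_le hk1 with rfl | h'
      · exact absurd hk4 hsw
      · omega
  case case4 j h =>
    simp only [Bool.false_eq_true, false_iff]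
    rintro ⟨k, hk1, hk2, _, _⟩; omega

theorem two_le_count_iff (l : List String) (i : Nat) (h : i < l.length) :
    2 ≤ l.count (l.getD i "") ↔ ∃ j, j < l.length ∧ j ≠ i ∧ l.getD j "" = l.getD i "" := by
  set s := l.getD i "" with hs
  have hsi : l[i] = s := (List.getD_eq_getElem l "" h).symm
  have hdec : l.count s = (l.take i).count s + (l.drop i).count s := by
    conv_lhs => rw [← List.take_append_drop i l]
    rw [List.count_append]
  have hdrop : l.drop i = l[i] :: l.drop (i+1) := List.drop_eq_getElem_cons h
  have hcnt : l.count s = (l.take i).count s + (1 + (l.drop (i+1)).count s) := by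
    rw [hdec, hdrop, hsi, List.count_cons_self]; ring_nf
  constructor
  · intro h2
    have : 0 < (l.take i).count s ∨ 0 < (l.drop (i+1)).count s := by omega
    rcases this with hc | hc
    · have hm : s ∈ l.take i := List.count_pos_iff.mp hc
      obtain ⟨j, hj, hje⟩ := List.getElem_of_mem hm
      have hjlen : j < i := by simp at hj; omega
      have : l[j]'(by omega) = s := by
        rw [← hje]; exact (List.getElem_take).symm
      exact ⟨j, by omega, by omega, by rw [List.getD_eq_getElem l "" (by omega)]; exact this⟩
    · have hm : s ∈ l.drop (i+1) := List.count_pos_iff.mp hc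
      obtain ⟨j, hj, hje⟩ := List.getElem_of_mem hm
      have hjlen : i + 1 + j < l.length := by simp at hj; omega
      have : l[i+1+j]'hjlen = s := by rw [← hje]; exact (List.getElem_drop ..).symm
      exact ⟨i+1+j, hjlen, by omega, by rw [List.getD_eq_getElem l "" hjlen]; exact this⟩
  · rintro ⟨j, hj, hji, hjs⟩
    have hje : l[j] = s := by rw [← hjs, List.getD_eq_getElem l "" hj]
    rcases Nat.lt_or_ge j i with hlt | hge
    · have hm : s ∈ l.take i := by
        refine List.mem_iff_getElem.mpr ⟨j, by simp; omega, ?_⟩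
        rw [List.getElem_take]; exact hje
      have := List.count_pos_iff.mpr hm
      omega
    · have hgt : i + 1 ≤ j := by omega
      have hm : s ∈ l.drop (i+1) := by
        refine List.mem_iff_getElem.mpr ⟨j - (i+1), by simp; omega, ?_⟩
        rw [List.getElem_drop]
        rw [← hje]
        exact getElem_congr rfl (by omega) (by omega)
      have := List.count_pos_iff.mpr hm
      omega

theorem aInner_zero_iff (strings : List String) (i : Nat) (h : i < strings.length) :
    aInner strings i 0 = true ↔
      (2 ≤ strings.count (strings.getD i "") ∨
       ∃ t ∈ strings, (strings.getD i "").toList <+: t.toList ∧ strings.getD i "" ≠ t) := by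
  rw [aInner_iff]
  constructor
  · rintro ⟨k, -, hk2, hk3, hk4⟩
    by_cases he : strings.getD i "" = strings.getD k ""
    · left
      exact (two_le_count_iff strings i h).mpr ⟨k, hk2, hk3, he.symm⟩
    · right
      refine ⟨strings.getD k "", ?_, hk4, he⟩
      rw [List.getD_eq_getElem strings "" hk2]
      exact List.getElem_mem hk2
  · rintro (hc | ⟨t, ht, hpre, hne⟩)
    · obtain ⟨j, hj1, hj2, hj3⟩ := (two_le_count_iff strings i h).mp hc
      exact ⟨j, Nat.zero_le j, hj1, hj2, by rw [hj3]⟩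
    · obtain ⟨k, hk, hke⟩ := List.getElem_of_mem ht
      refine ⟨k, Nat.zero_le k, hk, ?_, ?_⟩
      · intro he
        subst he
        apply hne
        rw [List.getD_eq_getElem strings "" hk, hke]
      · rw [List.getD_eq_getElem strings "" hk, hke]
        exact hpre

theorem foldl_bStep (strings : List String) (d : PySem.Dict String Int) (P : PySem.Set String) :
    strings.foldl bStep (d, P) =
      (strings.foldl (fun d s => d.insert s (d.getD s 0 + 1)) d,
       strings.foldl (fun P s => (PySem.List.pyRange 0 (PySem.Str.len s) 1).foldl
         (fun P k => PySem.Set.add P (PySem.Str.slice s none (some k))) P) P) := by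
  induction strings generalizing d P with
  | nil => rfl
  | cons x xs ih => simp only [List.foldl_cons, bStep, ih]

theorem count_component (strings : List String) (s : String) :
    (strings.foldl (fun d t => d.insert t (d.getD t 0 + 1)) PySem.Dict.empty).getD s 0
      = (strings.count s : Int) := by
  rw [PySem.Dict.foldl_insert_getD_add_one_eq_counter, PySem.Dict.getD_counter]

theorem mem_prefixSet (strings : List String) (P : PySem.Set String) (x : String) :
    x ∈ strings.foldl (fun P s => (PySem.List.pyRange 0 (PySem.Str.len s) 1).foldl
        (fun P k => PySem.Set.add P (PySem.Str.slice s none (some k))) P) P ↔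
      x ∈ P ∨ ∃ t ∈ strings, ∃ k : Nat, k < t.toList.length ∧ x.toList = t.toList.take k := by
  induction strings generalizing P with
  | nil => simp
  | cons t ts ih =>
    simp only [List.foldl_cons, ih, PySem.Set.mem_foldl_add]
    constructor
    · rintro (⟨hP | ⟨b, hb, he⟩⟩ | ⟨u, hu, k, hk, he⟩)
      · exact Or.inl hP
      · refine Or.inr ⟨t, List.mem_cons_self .., ?_⟩
        rw [PySem.List.mem_pyRange_one] at hb
        refine ⟨b.toNat, ?_, ?_⟩
        · have := PySem.Str.len_eq t; omega
        · rw [he]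
          have : (PySem.Str.slice t none (some b)).toList = t.toList.take b.toNat := by
            simp [PySem.List.slice_to _ hb.1]
          exact this
      · exact Or.inr ⟨u, List.mem_cons_of_mem _ hu, k, hk, he⟩
    · rintro (hP | ⟨u, hu, k, hk, he⟩)
      · exact Or.inl (Or.inl hP)
      · rcases List.mem_cons.mp hu with rfl | hu'
        · refine Or.inl (Or.inr ⟨(k : Int), ?_, ?_⟩)
          · rw [PySem.List.mem_pyRange_one]
            have := PySem.Str.len_eq u
            constructor
            · exact Int.natCast_nonneg k
            · omega
          · apply String.toList_inj.mp
            rw [he]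
            have : (PySem.Str.slice u none (some (k:Int))).toList = u.toList.take ((k:Int)).toNat := by
              simp [PySem.List.slice_to _ (Int.natCast_nonneg k)]
            rw [this, Int.toNat_natCast]
        · exact Or.inr ⟨u, hu', k, hk, he⟩

theorem proper_prefix_iff (x t : String) :
    (∃ k : Nat, k < t.toList.length ∧ x.toList = t.toList.take k) ↔
      (x.toList <+: t.toList ∧ x ≠ t) := by
  constructor
  · rintro ⟨k, hk, he⟩
    have hpre : x.toList <+: t.toList := he ▸ List.take_prefix k t.toList
    refine ⟨hpre, ?_⟩
    intro rfl_eq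
    subst rfl_eq
    have : x.toList.length < x.toList.length := by
      conv_lhs => rw [he]
      rw [List.length_take]
      omega
    omega
  · rintro ⟨hpre, hne⟩
    refine ⟨x.toList.length, ?_, (List.prefix_iff_eq_take.mp hpre)⟩
    have hle := List.IsPrefix.length_le hpre
    rcases Nat.lt_or_ge x.toList.length t.toList.length with h | h
    · exact h
    · exfalso
      apply hne
      apply String.toList_inj.mp
      exact List.IsPrefix.eq_of_length hpre (by omega)

theorem pred_eq_not_aInner (strings : List String) (i : Nat) (h : i < strings.length) :
    (((strings.foldl bStep (PySem.Dict.empty, PySem.Set.empty)).1.getD (strings.getD i "") 0 == 1) &&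
      !(PySem.Set.contains (strings.foldl bStep (PySem.Dict.empty, PySem.Set.empty)).2 (strings.getD i "")))
      = !aInner strings i 0 := by
  have hmem : strings.getD i "" ∈ strings := by
    rw [List.getD_eq_getElem strings "" h]; exact List.getElem_mem h
  have hcount1 : 1 ≤ strings.count (strings.getD i "") := List.count_pos_iff.mpr hmem
  rw [Bool.eq_iff_iff, foldl_bStep]
  rw [show ((!aInner strings i 0) = true) = (¬ (aInner strings i 0 = true)) from by simp]
  rw [aInner_zero_iff strings i h]
  simp only [count_component, Bool.and_eq_true, beq_iff_eq, Bool.not_eq_true',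
    Bool.eq_false_iff, Ne, PySem.Set.contains_iff, mem_prefixSet, PySem.Set.empty,
    List.not_mem_nil, false_or, proper_prefix_iff]
  constructor
  · rintro ⟨hc, hnp⟩
    have : strings.count (strings.getD i "") = 1 := by exact_mod_cast hc
    rintro (h2 | hex)
    · omega
    · exact hnp hex
  · intro hna
    refine ⟨?_, fun hex => hna (Or.inr hex)⟩
    have h2 : ¬ 2 ≤ strings.count (strings.getD i "") := fun hh => hna (Or.inl hh)
    have : strings.count (strings.getD i "") = 1 := by omega
    exact_mod_cast this

theorem aOuter_eq_filter (strings : List String) (i : Nat) :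
    aOuter strings i = (strings.drop i).filter (fun s =>
      ((strings.foldl bStep (PySem.Dict.empty, PySem.Set.empty)).1.getD s 0 == 1) &&
      !(PySem.Set.contains (strings.foldl bStep (PySem.Dict.empty, PySem.Set.empty)).2 s)) := by
  fun_induction aOuter strings i
  case case1 i h hin ih =>
    rw [ih, List.drop_eq_getElem_cons h, List.filter_cons]
    rw [← List.getD_eq_getElem strings "" h, pred_eq_not_aInner strings i h]
    simp [hin]
  case case2 i h hin ih =>
    rw [ih, List.drop_eq_getElem_cons h, List.filter_cons]
    rw [← List.getD_eq_getElem strings "" h, pred_eq_not_aInner strings i h]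
    simp [hin]
  case case3 i h =>
    rw [List.drop_eq_nil_of_le (by omega)]
    rfl

-- ===== VERDICT (by name: the statement is the Claim_ definition above) =====
theorem remove_prefix_strings_spec : Claim_equal_remove_prefix_strings := by
  intro strings _
  unfold Spec_remove_prefix_strings remove_prefix_strings remove_prefix_strings_alt
  simpa using aOuter_eq_filter strings 0
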